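-- pv_equiv track=rewrite | github.com/azure-way/aidocwriter | src/docwriter/stages/diagram_prep.py | _sanitize_source
-- ===== SOURCE A (Python) =====
-- from typing import Any, Dict, List, Tuple
--
-- def _sanitize_source(body: str) -> str:
--     raw = body.replace("\r\n", "\n").replace("\r", "\n")
--     raw = raw.replace("\\n", "\n")
--     lines = raw.split("\n")
--     sanitized: List[str] = []
--     started = False
--     for line in lines:
--         stripped = line.strip()
--         if stripped.startswith("```"):
--             continue
--         if not started:
--             if stripped.lower().startswith("@startuml"):
--                 sanitized.append(line)
--                 started = True
--             elif stripped.startswith(("'", "//", "#")) and "diagram_id" in stripped.lower():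
--                 continue
--             elif stripped == "":
--                 continue
--             else:
--                 sanitized.append(line)
--         else:
--             if stripped.startswith(("'", "//", "#")) and "diagram_id" in stripped.lower():
--                 continue
--             sanitized.append(line)
--     if not started:
--         sanitized = ["@startuml"] + sanitized + ["@enduml"]
--     text = "\n".join(sanitized)
--     if "@enduml" not in text.lower():
--         if not text.endswith("\n"):
--             text += "\n"
--         text += "@enduml"
--     return text
-- ===== SOURCE B (Python) =====
-- def _sanitize_source(body: str) -> str:
--     # Two-phase: filter the dropped line kinds once, then split at the first
--     # @startuml line and strip blanks only from the prefix before it.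
--     def is_dropped(line: str) -> bool:
--         s = line.strip()
--         if s.startswith("```"):
--             return True
--         return s.startswith(("'", "//", "#")) and "diagram_id" in s.lower()
--
--     raw = body.replace("\r\n", "\n").replace("\r", "\n").replace("\\n", "\n")
--     kept = [ln for ln in raw.split("\n") if not is_dropped(ln)]
--     idx = next((i for i, ln in enumerate(kept)
--                 if ln.strip().lower().startswith("@startuml")), None)
--     if idx is None:
--         lines = ["@startuml"] + [ln for ln in kept if ln.strip() != ""] + ["@enduml"]
--     else:
--         lines = [ln for ln in kept[:idx] if ln.strip() != ""] + kept[idx:]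
--     text = "\n".join(lines)
--     if "@enduml" not in text.lower():
--         if not text.endswith("\n"):
--             text += "\n"
--         text += "@enduml"
--     return text
-- ===== Notes on version B (the rewrite author's own statement) =====
-- stated objective: alternative
-- what changed: Replaces A's single stateful loop (a 'started' flag steering per-line decisions) by a pipeline: filter dropped lines once, locate the first @startuml line by index, and assemble the result from a blank-stripped prefix slice plus a verbatim suffix slice.
import Mathlib
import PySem

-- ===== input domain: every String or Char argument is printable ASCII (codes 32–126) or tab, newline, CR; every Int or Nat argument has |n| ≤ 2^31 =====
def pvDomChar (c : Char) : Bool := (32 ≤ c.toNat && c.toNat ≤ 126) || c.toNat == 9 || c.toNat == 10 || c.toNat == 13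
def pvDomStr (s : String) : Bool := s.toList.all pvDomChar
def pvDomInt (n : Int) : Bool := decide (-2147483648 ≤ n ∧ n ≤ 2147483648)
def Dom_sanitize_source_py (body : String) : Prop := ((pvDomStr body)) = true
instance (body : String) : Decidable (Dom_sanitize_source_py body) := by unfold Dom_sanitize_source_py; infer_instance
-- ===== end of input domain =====

-- B replaces A's stateful started-flag loop by a filter / find-index / slice pipeline (objective: alternative).

-- ===== PORT A =====
-- the loop body of A's 'for line in lines', state = (sanitized, started)
def pvAStep (st : List String × Bool) (line : String) : List String × Bool :=
  let stripped := PySem.Str.strip line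
  if PySem.Str.startswith stripped "```" then st
  else if !st.2 then
    if PySem.Str.startswith (PySem.Str.lower stripped) "@startuml" then (st.1 ++ [line], true)
    else if (PySem.Str.startswith stripped "'" || PySem.Str.startswith stripped "//"
              || PySem.Str.startswith stripped "#")
            && PySem.Str.isIn "diagram_id" (PySem.Str.lower stripped) then st
    else if stripped = "" then st
    else (st.1 ++ [line], st.2)
  else
    if (PySem.Str.startswith stripped "'" || PySem.Str.startswith stripped "//"
         || PySem.Str.startswith stripped "#")
        && PySem.Str.isIn "diagram_id" (PySem.Str.lower stripped) then st
    else (st.1 ++ [line], st.2)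

def sanitize_source_py (body : String) : String :=
  let raw := PySem.Str.replace (PySem.Str.replace body "\r\n" "\n") "\r" "\n"
  let raw := PySem.Str.replace raw "\\n" "\n"
  -- split? is always `some` here: the separator "\n" is nonempty
  let lines := (PySem.Str.split? raw "\n").getD []
  let res := lines.foldl pvAStep ([], false)
  let sanitized := if !res.2 then ["@startuml"] ++ res.1 ++ ["@enduml"] else res.1
  let text := PySem.Str.join "\n" sanitized
  if !(PySem.Str.isIn "@enduml" (PySem.Str.lower text)) then
    (if !(PySem.Str.endswith text "\n") then text ++ "\n" else text) ++ "@enduml"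
  else text

-- ===== PORT B =====
-- Source B's nested helper is_dropped
def pvIsDropped (line : String) : Bool :=
  let s := PySem.Str.strip line
  if PySem.Str.startswith s "```" then true
  else (PySem.Str.startswith s "'" || PySem.Str.startswith s "//" || PySem.Str.startswith s "#")
       && PySem.Str.isIn "diagram_id" (PySem.Str.lower s)

def sanitize_source_py_alt (body : String) : String :=
  let raw := PySem.Str.replace (PySem.Str.replace (PySem.Str.replace body "\r\n" "\n") "\r" "\n") "\\n" "\n"
  -- split? is always `some` here: the separator "\n" is nonempty
  let kept := ((PySem.Str.split? raw "\n").getD []).filter (fun ln => !pvIsDropped ln)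
  -- next((i for i, ln in enumerate(kept) if …), None) = List.findIdx?
  let idx := kept.findIdx? (fun ln => PySem.Str.startswith (PySem.Str.lower (PySem.Str.strip ln)) "@startuml")
  let lines :=
    match idx with
    | none => ["@startuml"] ++ kept.filter (fun ln => !(PySem.Str.strip ln == "")) ++ ["@enduml"]
    | some i => (kept.take i).filter (fun ln => !(PySem.Str.strip ln == "")) ++ kept.drop i
  let text := PySem.Str.join "\n" lines
  if PySem.Str.isIn "@enduml" (PySem.Str.lower text) then text
  else (if PySem.Str.endswith text "\n" then text else text ++ "\n") ++ "@enduml"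

-- ===== PRECONDITION & SPEC =====
def Spec_sanitize_source_py (body : String) (out : String) : Prop := out = sanitize_source_py_alt body
instance (body : String) (out : String) : Decidable (Spec_sanitize_source_py body out) := by unfold Spec_sanitize_source_py; infer_instance

-- ===== CLAIM (what is proved, stated in full; the proofs are below) =====
def Claim_equal_sanitize_source_py : Prop := ∀ (body : String), Dom_sanitize_source_py body → Spec_sanitize_source_py body (sanitize_source_py body)

-- ===== LEMMAS AND PROOFS =====

-- proof-side names for the line predicates both programs test
def pvStart (l : String) : Bool :=
  PySem.Str.startswith (PySem.Str.lower (PySem.Str.strip l)) "@startuml"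

def pvBlank (l : String) : Bool := PySem.Str.strip l == ""

-- B's assembled line list (and whether a @startuml line was found), as a function of the kept lines
def pvBOut (kept : List String) : List String × Bool :=
  match kept.findIdx? pvStart with
  | none => (kept.filter (fun l => !pvBlank l), false)
  | some i => ((kept.take i).filter (fun l => !pvBlank l) ++ kept.drop i, true)

theorem pv_head_not_prefix {c d : Char} {t p : List Char} (hne : c ≠ d) (hp : p.head? = some c) :
    PySem.Chars.startswith (d :: t) p = false := by
  rw [Bool.eq_false_iff]
  intro hx
  rw [PySem.Chars.startswith_iff] at hx
  cases p with
  | nil => simp at hp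
  | cons a q =>
    obtain ⟨u, hu⟩ := hx
    simp only [List.cons_append, List.cons.injEq] at hu
    simp only [List.head?_cons, Option.some.injEq] at hp
    exact hne (hp ▸ hu.1)

theorem pv_lowerChar_at {c : Char} (h : PySem.Chars.lowerChar c = '@') : c = '@' := by
  unfold PySem.Chars.lowerChar PySem.Chars.isupper at h
  split at h
  · rename_i hu
    simp only [Bool.and_eq_true, decide_eq_true_eq, Char.le_def] at hu
    have h64 : (Char.ofNat (c.toNat + 32)).toNat = 64 := by rw [h]; rfl
    have hv : (c.toNat + 32).isValidChar := by
      left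
      have h90 : c.val.toNat ≤ 90 := hu.2
      simp only [Char.toNat] at *
      omega
    rw [Char.toNat_ofNat, if_pos hv] at h64
    have h65 : 65 ≤ c.val.toNat := hu.1
    simp only [Char.toNat] at h64
    omega
  · exact h

-- a line recognized as @startuml has '@' as its first stripped character, so it is neither
-- a ``` fence nor a ' / // / # comment
theorem pv_start_head (l : String) (h : pvStart l = true) :
    PySem.Str.startswith (PySem.Str.strip l) "```" = false
    ∧ PySem.Str.startswith (PySem.Str.strip l) "'" = false
    ∧ PySem.Str.startswith (PySem.Str.strip l) "//" = false
    ∧ PySem.Str.startswith (PySem.Str.strip l) "#" = false := by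
  unfold pvStart at h
  rw [PySem.Str.startswith_eq, PySem.Str.toList_lower, PySem.Chars.startswith_iff] at h
  obtain ⟨c, t, hct⟩ : ∃ c t, (PySem.Str.strip l).toList = c :: t := by
    rcases hcs : (PySem.Str.strip l).toList with _ | ⟨c, t⟩
    · rw [hcs] at h
      have hnil : "@startuml".toList = ([] : List Char) :=
        List.prefix_nil.mp (by simpa [PySem.Chars.lower] using h)
      exact absurd hnil (by decide)
    · exact ⟨c, t, rfl⟩
  rw [hct] at h
  have hc : c = '@' := by
    apply pv_lowerChar_at
    have e9 : "@startuml".toList = '@' :: ['s','t','a','r','t','u','m','l'] := by decide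
    rw [e9] at h
    obtain ⟨u, hu⟩ := h
    simp only [PySem.Chars.lower, List.map_cons, List.cons_append, List.cons.injEq] at hu
    exact hu.1.symm
  subst hc
  refine ⟨?_, ?_, ?_, ?_⟩
  · rw [PySem.Str.startswith_eq, hct]
    exact pv_head_not_prefix (c := '`') (by decide) (by decide)
  · rw [PySem.Str.startswith_eq, hct]
    exact pv_head_not_prefix (c := '\'') (by decide) (by decide)
  · rw [PySem.Str.startswith_eq, hct]
    exact pv_head_not_prefix (c := '/') (by decide) (by decide)
  · rw [PySem.Str.startswith_eq, hct]
    exact pv_head_not_prefix (c := '#') (by decide) (by decide)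

-- pvAStep once started: drop fences and diagram_id comments, append everything else
theorem pv_step_started (acc : List String) (l : String) :
    pvAStep (acc, true) l = (acc ++ (if pvIsDropped l then [] else [l]), true) := by
  unfold pvAStep pvIsDropped
  cases htick : PySem.Str.startswith (PySem.Str.strip l) "```" with
  | true => simp only [htick, reduceIte, Bool.false_eq_true, Bool.true_eq_false, if_true, if_false, Bool.not_true, List.append_nil]
  | false =>
    cases hdiag : ((PySem.Str.startswith (PySem.Str.strip l) "'"
          || PySem.Str.startswith (PySem.Str.strip l) "//"
          || PySem.Str.startswith (PySem.Str.strip l) "#")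
        && PySem.Str.isIn "diagram_id" (PySem.Str.lower (PySem.Str.strip l))) with
    | true => simp only [htick, hdiag, reduceIte, Bool.false_eq_true, Bool.true_eq_false, if_true, if_false, Bool.not_true, List.append_nil]
    | false => simp only [htick, hdiag, reduceIte, Bool.false_eq_true, Bool.true_eq_false, if_true, if_false, Bool.not_true]

theorem pv_loop_started (lines : List String) (acc : List String) :
    lines.foldl pvAStep (acc, true) = (acc ++ lines.filter (fun l => !pvIsDropped l), true) := by
  induction lines generalizing acc with
  | nil => simp
  | cons l t ih =>
    rw [List.foldl_cons, pv_step_started, ih, List.filter_cons]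
    cases hd : pvIsDropped l <;> simp [hd]

theorem pv_loop_unstarted (lines : List String) (acc : List String) :
    lines.foldl pvAStep (acc, false)
      = (acc ++ (pvBOut (lines.filter (fun l => !pvIsDropped l))).1,
         (pvBOut (lines.filter (fun l => !pvIsDropped l))).2) := by
  induction lines generalizing acc with
  | nil => simp [pvBOut]
  | cons l t ih =>
    rw [List.foldl_cons, List.filter_cons]
    cases htick : PySem.Str.startswith (PySem.Str.strip l) "```" with
    | true =>
      have hdrop : pvIsDropped l = true := by unfold pvIsDropped; simp only [htick, reduceIte, Bool.false_eq_true, Bool.true_eq_false, if_true, if_false]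
      have hstep : pvAStep (acc, false) l = (acc, false) := by
        unfold pvAStep; simp only [htick, reduceIte, Bool.false_eq_true, Bool.true_eq_false, if_true, if_false]
      rw [hstep, ih, hdrop]
      simp only [Bool.not_true, Bool.false_eq_true, if_false]
    | false =>
      cases hstart : pvStart l with
      | true =>
        -- the @startuml line: A appends it and flips started; B finds it at index 0
        obtain ⟨-, h1, h2, h3⟩ := pv_start_head l hstart
        have hdrop : pvIsDropped l = false := by
          unfold pvIsDropped
          simp only [htick, h1, h2, h3, reduceIte, Bool.false_eq_true, Bool.true_eq_false, if_true, if_false, Bool.or_false, Bool.or_self, Bool.false_and]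
        have hs' : PySem.Str.startswith (PySem.Str.lower (PySem.Str.strip l)) "@startuml" = true :=
          hstart
        have hstep : pvAStep (acc, false) l = (acc ++ [l], true) := by
          unfold pvAStep; simp only [htick, hs', reduceIte, Bool.false_eq_true, Bool.true_eq_false, if_true, if_false, Bool.not_false]
        rw [hstep, pv_loop_started, hdrop]
        simp only [Bool.not_false, if_true, pvBOut, List.findIdx?_cons, hstart, if_pos rfl,
          List.take_zero, List.drop_zero, List.filter_nil, List.nil_append, List.append_assoc,
          List.singleton_append]
      | false =>
        have hs' : PySem.Str.startswith (PySem.Str.lower (PySem.Str.strip l)) "@startuml" = false :=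
          hstart
        cases hdiag : ((PySem.Str.startswith (PySem.Str.strip l) "'"
              || PySem.Str.startswith (PySem.Str.strip l) "//"
              || PySem.Str.startswith (PySem.Str.strip l) "#")
            && PySem.Str.isIn "diagram_id" (PySem.Str.lower (PySem.Str.strip l))) with
        | true =>
          have hdrop : pvIsDropped l = true := by
            unfold pvIsDropped; simp only [htick, hdiag, reduceIte, Bool.false_eq_true, Bool.true_eq_false, if_true, if_false]
          have hstep : pvAStep (acc, false) l = (acc, false) := by
            unfold pvAStep; simp only [htick, hs', hdiag, reduceIte, Bool.false_eq_true, Bool.true_eq_false, if_true, if_false, Bool.not_false]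
          rw [hstep, ih, hdrop]
          simp only [Bool.not_true, Bool.false_eq_true, if_false]
        | false =>
          have hdrop : pvIsDropped l = false := by
            unfold pvIsDropped; simp only [htick, hdiag, reduceIte, Bool.false_eq_true, Bool.true_eq_false, if_true, if_false]
          rw [hdrop]
          simp only [Bool.not_false, if_true]
          by_cases hblank : PySem.Str.strip l = ""
          · have hstep : pvAStep (acc, false) l = (acc, false) := by
              unfold pvAStep
              simp only [htick, hs', hdiag, reduceIte, Bool.false_eq_true, Bool.true_eq_false, if_true, if_false, Bool.not_false]
              rw [if_pos hblank]
            rw [hstep, ih]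
            simp only [pvBOut, List.findIdx?_cons, hstart, Bool.false_eq_true, if_false]
            cases hidx : List.findIdx? pvStart (t.filter (fun l => !pvIsDropped l)) with
            | none =>
              simp only [Option.map_none, List.filter_cons]
              have hb : pvBlank l = true := by unfold pvBlank; exact beq_iff_eq.mpr hblank
              simp [hb]
            | some i =>
              simp only [Option.map_some, List.take_succ_cons, List.drop_succ_cons,
                List.filter_cons]
              have hb : pvBlank l = true := by unfold pvBlank; exact beq_iff_eq.mpr hblank
              simp [hb]
          · have hstep : pvAStep (acc, false) l = (acc ++ [l], false) := by
              unfold pvAStep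
              simp only [htick, hs', hdiag, reduceIte, Bool.false_eq_true, Bool.true_eq_false, if_true, if_false, Bool.not_false]
              rw [if_neg hblank]
            rw [hstep, ih]
            simp only [pvBOut, List.findIdx?_cons, hstart, Bool.false_eq_true, if_false]
            cases hidx : List.findIdx? pvStart (t.filter (fun l => !pvIsDropped l)) with
            | none =>
              simp only [Option.map_none, List.filter_cons]
              have hb : pvBlank l = false := by unfold pvBlank; exact beq_eq_false_iff_ne.mpr hblank
              simp [hb]
            | some i =>
              simp only [Option.map_some, List.take_succ_cons, List.drop_succ_cons,
                List.filter_cons]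
              have hb : pvBlank l = false := by unfold pvBlank; exact beq_eq_false_iff_ne.mpr hblank
              simp [hb]

-- the shared tail of both ports, as a function of the split lines
theorem pv_tail (lines : List String) :
    (let res := lines.foldl pvAStep ([], false)
     let sanitized := if !res.2 then ["@startuml"] ++ res.1 ++ ["@enduml"] else res.1
     let text := PySem.Str.join "\n" sanitized
     if !(PySem.Str.isIn "@enduml" (PySem.Str.lower text)) then
       (if !(PySem.Str.endswith text "\n") then text ++ "\n" else text) ++ "@enduml"
     else text)
    = (let kept := lines.filter (fun ln => !pvIsDropped ln)
       let idx := kept.findIdx?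
         (fun ln => PySem.Str.startswith (PySem.Str.lower (PySem.Str.strip ln)) "@startuml")
       let lines' := match idx with
         | none => ["@startuml"] ++ kept.filter (fun ln => !(PySem.Str.strip ln == "")) ++ ["@enduml"]
         | some i => (kept.take i).filter (fun ln => !(PySem.Str.strip ln == "")) ++ kept.drop i
       let text := PySem.Str.join "\n" lines'
       if PySem.Str.isIn "@enduml" (PySem.Str.lower text) then text
       else (if PySem.Str.endswith text "\n" then text else text ++ "\n") ++ "@enduml") := by
  have hfi : (lines.filter (fun ln => !pvIsDropped ln)).findIdx?
      (fun ln => PySem.Str.startswith (PySem.Str.lower (PySem.Str.strip ln)) "@startuml")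
      = (lines.filter (fun ln => !pvIsDropped ln)).findIdx? pvStart := rfl
  simp only [hfi, pv_loop_unstarted, List.nil_append]
  have hsan : (let res := (pvBOut (lines.filter (fun ln => !pvIsDropped ln)));
       if !res.2 then ["@startuml"] ++ res.1 ++ ["@enduml"] else res.1)
      = (match (lines.filter (fun ln => !pvIsDropped ln)).findIdx? pvStart with
         | none => ["@startuml"]
             ++ (lines.filter (fun ln => !pvIsDropped ln)).filter
                  (fun ln => !(PySem.Str.strip ln == "")) ++ ["@enduml"]
         | some i => ((lines.filter (fun ln => !pvIsDropped ln)).take i).filter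
                  (fun ln => !(PySem.Str.strip ln == ""))
             ++ (lines.filter (fun ln => !pvIsDropped ln)).drop i) := by
    cases hidx : (lines.filter (fun ln => !pvIsDropped ln)).findIdx? pvStart with
    | none => simp only [pvBOut, hidx, Bool.not_false, if_true, pvBlank]
    | some i => simp only [pvBOut, hidx, Bool.not_true, Bool.false_eq_true, if_false, pvBlank]
  simp only [hsan]
  cases hin : PySem.Str.isIn "@enduml"
      (PySem.Str.lower (PySem.Str.join "\n"
        (match (lines.filter (fun ln => !pvIsDropped ln)).findIdx? pvStart with
         | none => ["@startuml"]
             ++ (lines.filter (fun ln => !pvIsDropped ln)).filter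
                  (fun ln => !(PySem.Str.strip ln == "")) ++ ["@enduml"]
         | some i => ((lines.filter (fun ln => !pvIsDropped ln)).take i).filter
                  (fun ln => !(PySem.Str.strip ln == ""))
             ++ (lines.filter (fun ln => !pvIsDropped ln)).drop i))) with
  | true => simp only [hin, Bool.not_true, Bool.false_eq_true, if_false, if_true]
  | false =>
    simp only [hin, Bool.not_false, if_true, Bool.false_eq_true, if_false]
    cases hend : PySem.Str.endswith (PySem.Str.join "\n"
        (match (lines.filter (fun ln => !pvIsDropped ln)).findIdx? pvStart with
         | none => ["@startuml"]
             ++ (lines.filter (fun ln => !pvIsDropped ln)).filter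
                  (fun ln => !(PySem.Str.strip ln == "")) ++ ["@enduml"]
         | some i => ((lines.filter (fun ln => !pvIsDropped ln)).take i).filter
                  (fun ln => !(PySem.Str.strip ln == ""))
             ++ (lines.filter (fun ln => !pvIsDropped ln)).drop i)) "\n" with
    | true => simp only [hend, Bool.not_true, Bool.false_eq_true, if_false, if_true]
    | false => simp only [hend, Bool.not_false, if_true, Bool.false_eq_true, if_false]

-- ===== VERDICT (by name: the statement is the Claim_ definition above) =====
theorem sanitize_source_py_spec : Claim_equal_sanitize_source_py := by
  intro body _
  unfold Spec_sanitize_source_py sanitize_source_py sanitize_source_py_alt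
  exact pv_tail ((PySem.Str.split?
    (PySem.Str.replace (PySem.Str.replace (PySem.Str.replace body "\r\n" "\n") "\r" "\n")
      "\\n" "\n") "\n").getD [])
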